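-- pv_equiv track=rewrite | github.com/koa800/meta-banner-maker | System/scripts/ai_batch_state.py | item_counts
-- ===== SOURCE A (Python) =====
-- from typing import Any, Optional
--
-- def item_counts(batch: dict[str, Any]) -> dict[str, int]:
--     counts = {"pending": 0, "running": 0, "completed": 0, "failed": 0}
--     for item in batch.get("items", []) or []:
--         status = str(item.get("status") or "pending")
--         if status not in counts:
--             status = "pending"
--         counts[status] += 1
--     counts["total"] = sum(counts.values())
--     return counts
-- ===== SOURCE B (Python) =====
-- CATS = ("pending", "running", "completed", "failed")
--
-- def item_counts(batch):
--     items = list(batch.get("items", []) or [])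
--
--     def category(item):
--         s = str(item.get("status") or "pending")
--         return s if s in CATS else "pending"
--
--     def tally(seg):
--         # divide and conquer: returns (pending, running, completed, failed)
--         n = len(seg)
--         if n == 0:
--             return (0, 0, 0, 0)
--         if n == 1:
--             c = category(seg[0])
--             return tuple(1 if k == c else 0 for k in CATS)
--         left = tally(seg[: n // 2])
--         right = tally(seg[n // 2 :])
--         return tuple(x + y for x, y in zip(left, right))
--
--     p, r, c, f = tally(items)
--     return {"pending": p, "running": r, "completed": c, "failed": f, "total": p + r + c + f}
-- ===== Notes on version B (the rewrite author's own statement) =====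
-- stated objective: alternative
-- what changed: Replaces A's single linear pass incrementing a dict with a divide-and-conquer recursion that splits the item list in halves, returns a 4-tuple of category counts per half and adds them component-wise; the total is the sum of the four components instead of a sum over dict values.
import Mathlib
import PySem

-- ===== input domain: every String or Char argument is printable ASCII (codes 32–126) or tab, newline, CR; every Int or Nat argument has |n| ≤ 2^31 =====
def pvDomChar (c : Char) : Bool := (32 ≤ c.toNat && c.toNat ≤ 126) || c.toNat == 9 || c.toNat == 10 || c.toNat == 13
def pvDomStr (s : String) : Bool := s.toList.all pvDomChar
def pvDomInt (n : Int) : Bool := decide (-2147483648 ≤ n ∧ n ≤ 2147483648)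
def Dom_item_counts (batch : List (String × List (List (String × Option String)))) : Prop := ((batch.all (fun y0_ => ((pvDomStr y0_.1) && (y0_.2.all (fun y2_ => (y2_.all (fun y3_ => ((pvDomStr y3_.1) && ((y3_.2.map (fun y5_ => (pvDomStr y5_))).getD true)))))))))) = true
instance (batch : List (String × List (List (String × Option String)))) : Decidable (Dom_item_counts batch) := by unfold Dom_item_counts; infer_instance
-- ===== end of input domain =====

-- B replaces A's linear dict-incrementing pass with a divide-and-conquer recursion over list halves
-- returning a 4-tuple of counts (same asymptotic cost, different algorithmic structure).

-- ===== PORT A =====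
-- one loop step of A: normalize the status against the current dict's keys, then increment
def itemCountsStep (d : PySem.Dict String Int) (item : List (String × Option String)) : PySem.Dict String Int :=
  let status0 : String :=
    match (PySem.Dict.mk item).get? "status" with
    | some (some s) => if s = "" then "pending" else s   -- str(item.get("status") or "pending")
    | _ => "pending"
  let status := if d.contains status0 then status0 else "pending"
  d.modify status 0 (· + 1)   -- counts[status] += 1 (status is always a key)

def item_counts (batch : List (String × List (List (String × Option String)))) : List (String × Int) :=
  let counts0 : PySem.Dict String Int :=
    PySem.Dict.mk [("pending", 0), ("running", 0), ("completed", 0), ("failed", 0)]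
  let items := ((PySem.Dict.mk batch).get? "items").getD []   -- batch.get("items", []) or []: a falsy list is already []
  let counts := items.foldl itemCountsStep counts0
  (counts.insert "total" (counts.values.foldl (· + ·) 0)).items

-- ===== PORT B =====
-- B's category: normalize the status into one of the four fixed categories
def categoryB (item : List (String × Option String)) : String :=
  let s : String :=
    match (PySem.Dict.mk item).get? "status" with
    | some (some t) => if t = "" then "pending" else t
    | _ => "pending"
  if s = "pending" ∨ s = "running" ∨ s = "completed" ∨ s = "failed" then s else "pending"

-- the 4-tuple for a single item: 1 in its category's slot
def unitT (c : String) : Int × Int × Int × Int :=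
  ((if c = "pending" then 1 else 0), (if c = "running" then 1 else 0),
   (if c = "completed" then 1 else 0), (if c = "failed" then 1 else 0))

-- component-wise addition (the zip/add of Source B)
def addT (x y : Int × Int × Int × Int) : Int × Int × Int × Int :=
  (x.1 + y.1, x.2.1 + y.2.1, x.2.2.1 + y.2.2.1, x.2.2.2 + y.2.2.2)

-- divide and conquer over the item list, as in Source B's tally
def tallyB : List (List (String × Option String)) → Int × Int × Int × Int
  | [] => (0, 0, 0, 0)
  | [x] => unitT (categoryB x)
  | x :: y :: rest =>
      addT (tallyB ((x :: y :: rest).take ((x :: y :: rest).length / 2)))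
           (tallyB ((x :: y :: rest).drop ((x :: y :: rest).length / 2)))
termination_by l => l.length
decreasing_by
  · simp [List.length_take]; omega
  · simp [List.length_drop]; omega

def item_counts_alt (batch : List (String × List (List (String × Option String)))) : List (String × Int) :=
  let items := ((PySem.Dict.mk batch).get? "items").getD []
  let t := tallyB items
  [("pending", t.1), ("running", t.2.1), ("completed", t.2.2.1), ("failed", t.2.2.2),
   ("total", t.1 + t.2.1 + t.2.2.1 + t.2.2.2)]

-- ===== PRECONDITION & SPEC =====
def Spec_item_counts (batch : List (String × List (List (String × Option String)))) (out : List (String × Int)) : Prop := out = item_counts_alt batch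
instance (batch : List (String × List (List (String × Option String)))) (out : List (String × Int)) : Decidable (Spec_item_counts batch out) := by unfold Spec_item_counts; infer_instance

-- ===== CLAIM (what is proved, stated in full; the proofs are below) =====
def Claim_equal_item_counts : Prop := ∀ (batch : List (String × List (List (String × Option String)))), Dom_item_counts batch → Spec_item_counts batch (item_counts batch)

-- ===== LEMMAS AND PROOFS =====

set_option maxRecDepth 4000 in
-- the fold of A over any literal 4-key dict adds, per key, the count of that normalized status
lemma itemCounts_fold (l : List (List (String × Option String))) (a b c f : Int) :
    l.foldl itemCountsStep (PySem.Dict.mk [("pending", a), ("running", b), ("completed", c), ("failed", f)])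
    = PySem.Dict.mk [("pending", a + ((l.map categoryB).count "pending" : Int)),
                     ("running", b + ((l.map categoryB).count "running" : Int)),
                     ("completed", c + ((l.map categoryB).count "completed" : Int)),
                     ("failed", f + ((l.map categoryB).count "failed" : Int))] := by
  induction l generalizing a b c f with
  | nil => simp [List.count]
  | cons x l ih =>
    have hstep : itemCountsStep (PySem.Dict.mk [("pending", a), ("running", b), ("completed", c), ("failed", f)]) x
        = PySem.Dict.mk [("pending", a + (if categoryB x = "pending" then 1 else 0)),
                         ("running", b + (if categoryB x = "running" then 1 else 0)),
                         ("completed", c + (if categoryB x = "completed" then 1 else 0)),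
                         ("failed", f + (if categoryB x = "failed" then 1 else 0))] := by
      unfold itemCountsStep categoryB
      cases h : (PySem.Dict.mk x).get? "status" with
      | none =>
        simp [PySem.Dict.contains, PySem.Dict.modify, PySem.Dict.insert, PySem.Dict.getD, PySem.Dict.get?]
      | some o => cases o with
        | none =>
          simp [PySem.Dict.contains, PySem.Dict.modify, PySem.Dict.insert, PySem.Dict.getD, PySem.Dict.get?]
        | some s =>
          by_cases hs : s = ""
          · simp [hs, PySem.Dict.contains, PySem.Dict.modify, PySem.Dict.insert, PySem.Dict.getD, PySem.Dict.get?]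
          · by_cases h1 : s = "pending"
            · simp [hs, h1, PySem.Dict.contains, PySem.Dict.modify, PySem.Dict.insert, PySem.Dict.getD, PySem.Dict.get?]
            · by_cases h2 : s = "running"
              · simp [hs, h1, h2, PySem.Dict.contains, PySem.Dict.modify, PySem.Dict.insert, PySem.Dict.getD, PySem.Dict.get?]
              · by_cases h3 : s = "completed"
                · simp [hs, h1, h2, h3, PySem.Dict.contains, PySem.Dict.modify, PySem.Dict.insert, PySem.Dict.getD, PySem.Dict.get?]
                · by_cases h4 : s = "failed"
                  · simp [hs, h1, h2, h3, h4, PySem.Dict.contains, PySem.Dict.modify, PySem.Dict.insert, PySem.Dict.getD, PySem.Dict.get?]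
                  · have hcont : (PySem.Dict.mk [("pending", a), ("running", b), ("completed", c), ("failed", f)]).contains s = false := by
                      simp only [PySem.Dict.contains, List.any_cons, List.any_nil, Bool.or_false,
                        Bool.or_eq_false_iff, beq_eq_false_iff_ne, ne_eq]
                      exact ⟨fun e => h1 e.symm, fun e => h2 e.symm, fun e => h3 e.symm, fun e => h4 e.symm⟩
                    simp [hs, h1, h2, h3, h4, hcont, PySem.Dict.modify, PySem.Dict.insert, PySem.Dict.getD, PySem.Dict.get?]
    rw [List.foldl_cons, hstep, ih]
    have hc : ∀ k : String, ((x :: l).map categoryB).count k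
        = (if categoryB x = k then 1 else 0) + (l.map categoryB).count k := by
      intro k
      simp only [List.map_cons, List.count_cons, beq_iff_eq]
      by_cases hk : categoryB x = k <;> simp [hk] <;> omega
    simp only [hc]
    push_cast
    ring_nf

-- B's divide-and-conquer tally computes exactly the per-category counts
lemma tallyB_eq (l : List (List (String × Option String))) :
    tallyB l = (((l.map categoryB).count "pending" : Int),
                ((l.map categoryB).count "running" : Int),
                ((l.map categoryB).count "completed" : Int),
                ((l.map categoryB).count "failed" : Int)) := by
  induction l using tallyB.induct with
  | case1 => simp [tallyB]
  | case2 x =>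
    simp only [tallyB, unitT, List.map_cons, List.map_nil, List.count_cons, List.count_nil,
      beq_iff_eq]
    by_cases h1 : categoryB x = "pending" <;> by_cases h2 : categoryB x = "running" <;>
      by_cases h3 : categoryB x = "completed" <;> by_cases h4 : categoryB x = "failed" <;>
      simp_all
  | case3 x y rest ih1 ih2 =>
    rw [tallyB, ih1, ih2]
    have hk : ∀ k : String,
        ((((x :: y :: rest).take ((x :: y :: rest).length / 2)).map categoryB).count k)
          + ((((x :: y :: rest).drop ((x :: y :: rest).length / 2)).map categoryB).count k)
        = (((x :: y :: rest).map categoryB).count k) := by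
      intro k
      conv_rhs => rw [← List.take_append_drop ((x :: y :: rest).length / 2) (x :: y :: rest)]
      rw [List.map_append, List.count_append]
    simp only [addT]
    refine Prod.ext ?_ (Prod.ext ?_ (Prod.ext ?_ ?_)) <;>
      · dsimp only
        exact_mod_cast hk _

-- proof-side abbreviation: the count of category k among the normalized items
def cnt (batch : List (String × List (List (String × Option String)))) (k : String) : Int :=
  (((((PySem.Dict.mk batch).get? "items").getD []).map categoryB).count k : Int)

lemma item_counts_unfold (batch : List (String × List (List (String × Option String)))) :
    item_counts batch
    = [("pending", cnt batch "pending"), ("running", cnt batch "running"),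
       ("completed", cnt batch "completed"), ("failed", cnt batch "failed"),
       ("total", cnt batch "pending" + cnt batch "running"
          + cnt batch "completed" + cnt batch "failed")] := by
  simp only [item_counts, cnt]
  rw [itemCounts_fold]
  simp [PySem.Dict.insert, PySem.Dict.values, PySem.Dict.items, PySem.Dict.contains,
    PySem.Dict.getD, PySem.Dict.get?]

-- ===== VERDICT (by name: the statement is the Claim_ definition above) =====
theorem item_counts_spec : Claim_equal_item_counts := by
  intro batch _
  unfold Spec_item_counts
  rw [item_counts_unfold]
  simp only [item_counts_alt]
  rw [tallyB_eq]
  simp [cnt]
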